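-- pv_equiv track=rewrite | github.com/zalio/word-problem-solver-thesis | number_assigners/type0_num_assigner.py | prioritize_discovered_numbers
-- ===== SOURCE A (Python) =====
-- def prioritize_discovered_numbers(all_discovered_numbers, all_related_number_strings):
--     prioritized_numbers = []
--     backup_numbers = []
--     for i in all_discovered_numbers:
--         if i == "1" or i == "2":
--             backup_numbers.append(i)
--         else:
--             prioritized_numbers.append(i)
--     for i in all_related_number_strings:
--         if i == "one" or i == "two":
--             backup_numbers.append(i)
--         else:
--             prioritized_numbers.append(i)
--
--     while len(prioritized_numbers) < 3 and len(backup_numbers) > 0: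
--         prioritized_numbers.append(backup_numbers[0])
--         backup_numbers.pop(0)
--     return prioritized_numbers, backup_numbers
-- ===== SOURCE B (Python) =====
-- def prioritize_discovered_numbers(all_discovered_numbers, all_related_number_strings):
--     # Sort-then-cut: tag every item with a boolean "backup" key, stably sort the
--     # single concatenated stream by that key (non-backup items first, order kept),
--     # and cut the ordered stream at one index instead of transferring items.
--     def tag(seq, specials):
--         return [(s in specials, s) for s in seq]
--     ordered = sorted(tag(all_discovered_numbers, {"1", "2"})
--                      + tag(all_related_number_strings, {"one", "two"}),
--                      key=lambda t: t[0])
--     k = sum(1 for sp, _ in ordered if not sp)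
--     cut = max(k, min(3, len(ordered)))
--     return [s for _, s in ordered[:cut]], [s for _, s in ordered[cut:]]
-- ===== Notes on version B (the rewrite author's own statement) =====
-- stated objective: alternative
-- what changed: Replaces the two partition accumulator loops and the pop(0) transfer loop by a stable sort of the single tagged concatenated stream keyed on the backup flag, followed by one closed-form cut index max(k, min(3, len)) that yields both output lists.
import Mathlib
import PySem

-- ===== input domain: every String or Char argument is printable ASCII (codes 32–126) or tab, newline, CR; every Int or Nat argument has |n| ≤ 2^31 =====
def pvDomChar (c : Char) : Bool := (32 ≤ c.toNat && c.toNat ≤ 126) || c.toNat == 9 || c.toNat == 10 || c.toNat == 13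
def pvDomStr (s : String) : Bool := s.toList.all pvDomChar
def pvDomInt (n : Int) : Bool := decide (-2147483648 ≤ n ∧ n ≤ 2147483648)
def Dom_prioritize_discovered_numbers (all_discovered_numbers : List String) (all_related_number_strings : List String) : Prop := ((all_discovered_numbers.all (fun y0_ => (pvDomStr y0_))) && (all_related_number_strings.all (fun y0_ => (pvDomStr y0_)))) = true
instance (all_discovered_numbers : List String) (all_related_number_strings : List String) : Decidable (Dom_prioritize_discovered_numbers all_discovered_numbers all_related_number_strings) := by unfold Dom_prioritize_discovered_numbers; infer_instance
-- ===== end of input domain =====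

-- B replaces the partition loops and the pop(0) transfer loop by a stable sort of the
-- tagged concatenated stream keyed on the backup flag plus one closed-form cut index;
-- objective: alternative.

-- ===== PORT A =====
-- the trailing while loop: move backup's head to prioritized while len < 3
def pdnWhileA (p : List String) : List String → List String × List String
  | [] => (p, [])
  | x :: rest => if p.length < 3 then pdnWhileA (p ++ [x]) rest else (p, x :: rest)

def prioritize_discovered_numbers (all_discovered_numbers : List String) (all_related_number_strings : List String) : List String × List String :=
  let pb := all_discovered_numbers.foldl
    (fun (pb : List String × List String) i =>
      if i == "1" || i == "2" then (pb.1, pb.2 ++ [i]) else (pb.1 ++ [i], pb.2)) ([], [])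
  let pb := all_related_number_strings.foldl
    (fun (pb : List String × List String) i =>
      if i == "one" || i == "two" then (pb.1, pb.2 ++ [i]) else (pb.1 ++ [i], pb.2)) pb
  pdnWhileA pb.1 pb.2

-- ===== PORT B =====
-- tag(seq, specials) = [(s in specials, s) for s in seq]
def pdnTag (seq : List String) (specials : PySem.Set String) : List (Bool × String) :=
  seq.map (fun s => (PySem.Set.contains specials s, s))

def prioritize_discovered_numbers_alt (all_discovered_numbers : List String) (all_related_number_strings : List String) : List String × List String :=
  let ordered := PySem.List.sorted
    (pdnTag all_discovered_numbers (PySem.Set.ofList ["1", "2"])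
      ++ pdnTag all_related_number_strings (PySem.Set.ofList ["one", "two"]))
    (fun t => t.1)
  let k : Int := ordered.countP (fun t => !t.1)   -- sum(1 for sp,_ in ordered if not sp)
  let cut : Int := max k (min 3 (ordered.length : Int))
  -- cut ≥ 0, so the slices ordered[:cut] / ordered[cut:] are take/drop at cut
  ((ordered.take cut.toNat).map Prod.snd, (ordered.drop cut.toNat).map Prod.snd)

-- ===== PRECONDITION & SPEC =====
def Spec_prioritize_discovered_numbers (all_discovered_numbers : List String) (all_related_number_strings : List String) (out : List String × List String) : Prop := out = prioritize_discovered_numbers_alt all_discovered_numbers all_related_number_strings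
instance (all_discovered_numbers : List String) (all_related_number_strings : List String) (out : List String × List String) : Decidable (Spec_prioritize_discovered_numbers all_discovered_numbers all_related_number_strings out) := by unfold Spec_prioritize_discovered_numbers; infer_instance

-- ===== CLAIM (what is proved, stated in full; the proofs are below) =====
def Claim_equal_prioritize_discovered_numbers : Prop := ∀ (all_discovered_numbers : List String) (all_related_number_strings : List String), Dom_prioritize_discovered_numbers all_discovered_numbers all_related_number_strings → Spec_prioritize_discovered_numbers all_discovered_numbers all_related_number_strings (prioritize_discovered_numbers all_discovered_numbers all_related_number_strings)

-- ===== LEMMAS AND PROOFS =====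

-- A's accumulator loop over one list = append of the two filters
theorem pdn_fold_partition (f : String → Bool) (xs : List String) (p b : List String) :
    xs.foldl (fun (pb : List String × List String) i =>
      if f i then (pb.1, pb.2 ++ [i]) else (pb.1 ++ [i], pb.2)) (p, b)
    = (p ++ xs.filter (fun s => !f s), b ++ xs.filter f) := by
  induction xs generalizing p b with
  | nil => simp
  | cons x xs ih =>
    by_cases h : f x <;> simp [h, ih, List.append_assoc]

-- A's while loop = take/drop transfer
theorem pdnWhileA_eq (b p : List String) :
    pdnWhileA p b = (p ++ b.take (3 - p.length), b.drop (3 - p.length)) := by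
  induction b generalizing p with
  | nil => simp [pdnWhileA]
  | cons x rest ih =>
    by_cases h : p.length < 3
    · have hn : 3 - p.length = (3 - (p ++ [x]).length) + 1 := by simp; omega
      simp only [pdnWhileA, if_pos h, ih, hn, List.take_succ_cons, List.drop_succ_cons,
        List.append_assoc, List.singleton_append]
    · have hn : 3 - p.length = 0 := by omega
      simp [pdnWhileA, h, hn]

-- inserting a false-keyed element lands at the end of the false block
theorem pdn_insertBy_false {α : Type} (key : α → Bool) (x : α) (hx : key x = false)
    (F T : List α) (hF : ∀ y ∈ F, key y = false) (hT : ∀ y ∈ T, key y = true) :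
    PySem.List.insertBy (fun a b => decide (key a < key b)) x (F ++ T) = F ++ x :: T := by
  induction F with
  | nil =>
    cases T with
    | nil => simp [PySem.List.insertBy]
    | cons t ts =>
      have ht : key t = true := hT t (by simp)
      simp [PySem.List.insertBy, hx, ht]
  | cons f fs ih =>
    have hf : key f = false := hF f (by simp)
    have hb : decide (key x < key f) = false := by rw [hx, hf]; decide
    have ih' := ih (fun y hy => hF y (by simp [hy]))
    simp [PySem.List.insertBy, hb, ih']

-- inserting a true-keyed element lands at the very end
theorem pdn_insertBy_true {α : Type} (key : α → Bool) (x : α) (hx : key x = true)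
    (L : List α) :
    PySem.List.insertBy (fun a b => decide (key a < key b)) x L = L ++ [x] := by
  apply PySem.List.insertBy_of_forall_not_before
  intro y _
  rw [hx]; cases key y <;> decide

-- the insertion-sort fold keyed on a Bool is the stable partition
theorem pdn_sort_fold {α : Type} (key : α → Bool) (xs F T : List α)
    (hF : ∀ y ∈ F, key y = false) (hT : ∀ y ∈ T, key y = true) :
    xs.foldl (fun acc x => PySem.List.insertBy (fun a b => decide (key a < key b)) x acc) (F ++ T)
    = (F ++ xs.filter (fun y => !key y)) ++ (T ++ xs.filter key) := by
  induction xs generalizing F T with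
  | nil => simp
  | cons x xs ih =>
    by_cases h : key x
    · have step := pdn_insertBy_true key x h (F ++ T)
      have hT' : ∀ y ∈ T ++ [x], key y = true := by
        intro y hy
        rcases List.mem_append.1 hy with hy | hy
        · exact hT y hy
        · simp at hy; subst hy; exact h
      rw [List.foldl_cons, step, List.append_assoc, ih F (T ++ [x]) hF hT']
      simp [h, List.append_assoc]
    · have hx : key x = false := by simpa using h
      have step := pdn_insertBy_false key x hx F T hF hT
      have hF' : ∀ y ∈ F ++ [x], key y = false := by
        intro y hy
        rcases List.mem_append.1 hy with hy | hy
        · exact hF y hy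
        · simp at hy; subst hy; exact hx
      have hsplit : F ++ x :: T = (F ++ [x]) ++ T := by simp
      rw [List.foldl_cons, step, hsplit, ih (F ++ [x]) T hF' hT]
      simp [hx, List.append_assoc]

-- sorted by a Bool key = stable partition (false block then true block)
theorem pdn_sorted_bool {α : Type} (key : α → Bool) (xs : List α) :
    PySem.List.sorted xs key = xs.filter (fun y => !key y) ++ xs.filter key := by
  rw [PySem.List.sorted_eq_foldl_insertBy]
  simpa using pdn_sort_fold key xs [] [] (by intro y hy; cases hy) (by intro y hy; cases hy)

-- B's membership tests agree with A's equality tests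
theorem pdn_contains12 (s : String) :
    PySem.Set.contains (PySem.Set.ofList ["1", "2"]) s = (s == "1" || s == "2") := by
  have h : PySem.Set.ofList ["1", "2"] = ["1", "2"] := by decide
  rw [PySem.Set.contains, h]
  simp [beq_eq_decide]

theorem pdn_contains_ot (s : String) :
    PySem.Set.contains (PySem.Set.ofList ["one", "two"]) s = (s == "one" || s == "two") := by
  have h : PySem.Set.ofList ["one", "two"] = ["one", "two"] := by decide
  rw [PySem.Set.contains, h]
  simp [beq_eq_decide]

-- filters of a tagged list are the tagged filters of the strings
theorem pdn_tag_filter_neg (p : String → Bool) (xs : List String) :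
    ((xs.map (fun s => (p s, s))).filter (fun t => !t.1))
      = (xs.filter (fun s => !p s)).map (fun s => (p s, s)) := by
  induction xs with
  | nil => rfl
  | cons x xs ih => by_cases h : p x <;> simp [h, ih]

theorem pdn_tag_filter_pos (p : String → Bool) (xs : List String) :
    ((xs.map (fun s => (p s, s))).filter (fun t => t.1))
      = (xs.filter p).map (fun s => (p s, s)) := by
  induction xs with
  | nil => rfl
  | cons x xs ih => by_cases h : p x <;> simp [h, ih]

-- dropping the tags gives back the strings
theorem pdn_map_snd (p : String → Bool) (xs : List String) :
    (xs.map (fun s => (p s, s))).map Prod.snd = xs := by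
  simp [List.map_map, Function.comp_def]

-- every element of a (!p)-filtered tagged list has a false tag
theorem pdn_countP_neg (p : String → Bool) (xs : List String) :
    List.countP (fun t => !t.1) ((xs.filter (fun s => !p s)).map (fun s => (p s, s)))
      = ((xs.filter (fun s => !p s)).map (fun s => (p s, s))).length := by
  rw [List.countP_map, List.length_map]
  apply List.countP_eq_length.2
  intro s hs
  simp only [List.mem_filter] at hs
  simpa using hs.2

-- every element of a p-filtered tagged list has a true tag
theorem pdn_countP_pos (p : String → Bool) (xs : List String) :
    List.countP (fun t => !t.1) ((xs.filter p).map (fun s => (p s, s))) = 0 := by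
  rw [List.countP_map]
  apply List.countP_eq_zero.2
  intro s hs
  simp only [List.mem_filter] at hs
  simpa using hs.2

-- the closed-form cut of the partitioned tagged stream = A's take/drop transfer
theorem pdn_cut (F T : List String) (Ftag Ttag : List (Bool × String))
    (hFm : Ftag.map Prod.snd = F) (hTm : Ttag.map Prod.snd = T)
    (hkF : List.countP (fun t => !t.1) Ftag = Ftag.length)
    (hkT : List.countP (fun t => !t.1) Ttag = 0) :
    (((Ftag ++ Ttag).take (max ((List.countP (fun t => !t.1) (Ftag ++ Ttag) : Int))
          (min 3 ((Ftag ++ Ttag).length : Int))).toNat).map Prod.snd,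
      ((Ftag ++ Ttag).drop (max ((List.countP (fun t => !t.1) (Ftag ++ Ttag) : Int))
          (min 3 ((Ftag ++ Ttag).length : Int))).toNat).map Prod.snd)
    = (F ++ T.take (3 - F.length), T.drop (3 - F.length)) := by
  set n : Nat := (max ((List.countP (fun t => !t.1) (Ftag ++ Ttag) : Int))
      (min 3 ((Ftag ++ Ttag).length : Int))).toNat with hn
  have hFlen : F.length = Ftag.length := by rw [← hFm, List.length_map]
  have hTlen : T.length = Ttag.length := by rw [← hTm, List.length_map]
  have hcount : List.countP (fun t => !t.1) (Ftag ++ Ttag) = Ftag.length := by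
    rw [List.countP_append, hkF, hkT]; omega
  have hnval : n = max Ftag.length (min 3 (Ftag.length + Ttag.length)) := by
    rw [hn, hcount, List.length_append]; omega
  have hkn : Ftag.length ≤ n := by omega
  rw [List.take_append, List.drop_append, List.take_of_length_le hkn,
    List.drop_eq_nil_of_le hkn, List.map_append, hFm, List.nil_append]
  have hmin : n - Ftag.length = min (3 - Ftag.length) Ttag.length := by omega
  have htake : Ttag.take (n - Ftag.length) = Ttag.take (3 - Ftag.length) := by
    rw [hmin]; exact List.take_eq_take_min.symm
  have hdrop : Ttag.drop (n - Ftag.length) = Ttag.drop (3 - Ftag.length) := by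
    rw [hmin]
    by_cases h : 3 - Ftag.length ≤ Ttag.length
    · rw [Nat.min_eq_left h]
    · have h1 : min (3 - Ftag.length) Ttag.length = Ttag.length := by omega
      rw [h1, List.drop_length, List.drop_eq_nil_of_le (by omega)]
  rw [htake, hdrop, List.map_take, List.map_drop, hTm, hFlen]

-- ===== VERDICT (by name: the statement is the Claim_ definition above) =====
theorem prioritize_discovered_numbers_spec : Claim_equal_prioritize_discovered_numbers := by
  intro d r _
  show prioritize_discovered_numbers d r = prioritize_discovered_numbers_alt d r
  unfold prioritize_discovered_numbers prioritize_discovered_numbers_alt pdnTag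
  simp only [pdn_contains12, pdn_contains_ot, pdn_fold_partition, pdnWhileA_eq,
    pdn_sorted_bool, List.filter_append, pdn_tag_filter_neg, pdn_tag_filter_pos,
    List.nil_append]
  exact (pdn_cut
    (d.filter (fun s => !(s == "1" || s == "2")) ++ r.filter (fun s => !(s == "one" || s == "two")))
    (d.filter (fun s => s == "1" || s == "2") ++ r.filter (fun s => s == "one" || s == "two"))
    ((d.filter (fun s => !(s == "1" || s == "2"))).map (fun s => (s == "1" || s == "2", s))
      ++ (r.filter (fun s => !(s == "one" || s == "two"))).map (fun s => (s == "one" || s == "two", s)))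
    ((d.filter (fun s => s == "1" || s == "2")).map (fun s => (s == "1" || s == "2", s))
      ++ (r.filter (fun s => s == "one" || s == "two")).map (fun s => (s == "one" || s == "two", s)))
    (by rw [List.map_append, pdn_map_snd, pdn_map_snd])
    (by rw [List.map_append, pdn_map_snd, pdn_map_snd])
    (by rw [List.countP_append, pdn_countP_neg, pdn_countP_neg, List.length_append])
    (by rw [List.countP_append, pdn_countP_pos, pdn_countP_pos])).symm
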